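-- pv_equiv track=rewrite | github.com/LongWeeeeeee/bets | base/test_filters.py | is_early_match_stable5k_5min
-- ===== SOURCE A (Python) =====
-- from typing import Tuple, Optional, Dict, Any
--
-- def is_early_match_stable5k_5min(match: Dict) -> Tuple[bool, Optional[str]]:
--     """Stable lead >= 5k минимум 5 минут подряд на 15-30."""
--     leads = match.get('radiantNetworthLeads', [])
--     duration = len(leads)
--
--     if duration < 30 or duration > 50:
--         return False, None
--
--     consecutive_r = 0
--     consecutive_d = 0
--
--     for i in range(15, min(30, duration)):
--         if leads[i] >= 5000:
--             consecutive_r += 1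
--             consecutive_d = 0
--             if consecutive_r >= 5:
--                 return True, 'radiant'
--         elif leads[i] <= -5000:
--             consecutive_d += 1
--             consecutive_r = 0
--             if consecutive_d >= 5:
--                 return True, 'dire'
--         else:
--             consecutive_r = 0
--             consecutive_d = 0
--
--     return False, None
-- ===== SOURCE B (Python) =====
-- from typing import Tuple, Optional, Dict
--
-- def is_early_match_stable5k_5min(match: Dict) -> Tuple[bool, Optional[str]]:
--     """Stable lead >= 5k for at least 5 consecutive minutes within 15-30."""
--     leads = match.get('radiantNetworthLeads', [])
--     if not (30 <= len(leads) <= 50):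
--         return False, None
--     for j in range(15, 26):
--         window = leads[j:j + 5]
--         if all(v >= 5000 for v in window):
--             return True, 'radiant'
--         if all(v <= -5000 for v in window):
--             return True, 'dire'
--     return False, None
-- ===== Notes on version B (the rewrite author's own statement) =====
-- stated objective: simpler
-- what changed: Replaces the stateful scan with two consecutive-counters by a direct check of each 5-element window leads[j:j+5] for j in 15..25 (all >= 5000, else all <= -5000), which reads as the specification itself.
import Mathlib
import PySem

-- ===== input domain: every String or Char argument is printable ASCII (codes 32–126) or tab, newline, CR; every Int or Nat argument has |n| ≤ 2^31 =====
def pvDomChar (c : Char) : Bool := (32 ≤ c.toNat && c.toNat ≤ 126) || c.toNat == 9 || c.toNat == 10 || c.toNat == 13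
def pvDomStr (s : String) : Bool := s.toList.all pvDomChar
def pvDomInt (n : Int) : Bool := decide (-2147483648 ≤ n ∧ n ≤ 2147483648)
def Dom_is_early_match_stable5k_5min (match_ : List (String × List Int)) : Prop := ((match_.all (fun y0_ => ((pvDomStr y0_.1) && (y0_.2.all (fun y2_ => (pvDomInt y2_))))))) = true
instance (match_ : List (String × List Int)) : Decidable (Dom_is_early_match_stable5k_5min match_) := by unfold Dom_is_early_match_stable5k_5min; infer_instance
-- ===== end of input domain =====

-- B replaces A's stateful scan with two consecutive-run counters by a direct check of each
-- 5-element window leads[j:j+5] for j in 15..25 (all >= 5000 / all <= -5000): simpler, same cost.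

-- shared helper: match.get('radiantNetworthLeads', []) — first-match association-list lookup
def pvGetLeads : List (String × List Int) → List Int
  | [] => []
  | (k, v) :: rest => if k == "radiantNetworthLeads" then v else pvGetLeads rest

-- ===== PORT A =====
-- A's for-loop over i in range(15, min(30, duration)) with the two counters and early returns
def pvLoopA (leads : List Int) : List Int → Int → Int → Bool × Option String
  | [], _, _ => (false, none)
  | i :: rest, cr, cd =>
    match PySem.List.pyGet? leads i with
    | none => (false, none)   -- unreachable: every loop index i satisfies 0 ≤ i < 30 ≤ len(leads)
    | some v =>
      if v ≥ 5000 then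
        if cr + 1 ≥ 5 then (true, some "radiant") else pvLoopA leads rest (cr + 1) 0
      else if v ≤ -5000 then
        if cd + 1 ≥ 5 then (true, some "dire") else pvLoopA leads rest 0 (cd + 1)
      else pvLoopA leads rest 0 0

def is_early_match_stable5k_5min (match_ : List (String × List Int)) : Bool × Option String :=
  let leads := pvGetLeads match_
  let duration : Int := leads.length
  if duration < 30 ∨ duration > 50 then (false, none)
  else pvLoopA leads (PySem.List.pyRange 15 (min 30 duration) 1) 0 0

-- ===== PORT B =====
-- B's for-loop over j in range(15, 26) testing the window leads[j:j+5]
def pvLoopB (leads : List Int) : List Int → Bool × Option String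
  | [] => (false, none)
  | j :: rest =>
    let w := PySem.List.slice leads (some j) (some (j + 5))
    if w.all (fun v => v ≥ 5000) then (true, some "radiant")
    else if w.all (fun v => v ≤ -5000) then (true, some "dire")
    else pvLoopB leads rest

def is_early_match_stable5k_5min_alt (match_ : List (String × List Int)) : Bool × Option String :=
  let leads := pvGetLeads match_
  if ¬ (30 ≤ (leads.length : Int) ∧ (leads.length : Int) ≤ 50) then (false, none)
  else pvLoopB leads (PySem.List.pyRange 15 26 1)

-- ===== PRECONDITION & SPEC =====
def Spec_is_early_match_stable5k_5min (match_ : List (String × List Int)) (out : Bool × Option String) : Prop := out = is_early_match_stable5k_5min_alt match_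
instance (match_ : List (String × List Int)) (out : Bool × Option String) : Decidable (Spec_is_early_match_stable5k_5min match_ out) := by unfold Spec_is_early_match_stable5k_5min; infer_instance

-- ===== CLAIM (what is proved, stated in full; the proofs are below) =====
def Claim_equal_is_early_match_stable5k_5min : Prop := ∀ (match_ : List (String × List Int)), Dom_is_early_match_stable5k_5min match_ → Spec_is_early_match_stable5k_5min match_ (is_early_match_stable5k_5min match_)

-- ===== LEMMAS AND PROOFS =====

-- value-level version of A's loop (indices already resolved to the values they read)
def pvRunA : List Int → Int → Int → Bool × Option String
  | [], _, _ => (false, none)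
  | v :: t, cr, cd =>
    if v ≥ 5000 then
      if cr + 1 ≥ 5 then (true, some "radiant") else pvRunA t (cr + 1) 0
    else if v ≤ -5000 then
      if cd + 1 ≥ 5 then (true, some "dire") else pvRunA t 0 (cd + 1)
    else pvRunA t 0 0

-- value-level version of B's loop (window = the first five values of the remaining list)
def pvRunB : List Int → Bool × Option String
  | a :: b :: c :: d :: e :: rest =>
    if [a, b, c, d, e].all (fun v => v ≥ 5000) then (true, some "radiant")
    else if [a, b, c, d, e].all (fun v => v ≤ -5000) then (true, some "dire")
    else pvRunB (b :: c :: d :: e :: rest)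
  | _ => (false, none)

-- pvRunB returns (false, none) on lists shorter than a window
lemma pvRunB_short (vs : List Int) (h : vs.length < 5) : pvRunB vs = (false, none) := by
  rcases vs with _ | ⟨a, _ | ⟨b, _ | ⟨c, _ | ⟨d, _ | ⟨e, rest⟩⟩⟩⟩⟩ <;> first | rfl | (simp at h; omega)

-- one unfolding step of pvRunB when a full window is available
lemma pvRunB_cons5 (vs : List Int) (h : 5 ≤ vs.length) :
    pvRunB vs = (if (vs.take 5).all (fun v => v ≥ 5000) then (true, some "radiant")
      else if (vs.take 5).all (fun v => v ≤ -5000) then (true, some "dire")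
      else pvRunB vs.tail) := by
  rcases vs with _ | ⟨a, _ | ⟨b, _ | ⟨c, _ | ⟨d, _ | ⟨e, rest⟩⟩⟩⟩⟩ <;>
    first
      | (simp only [List.length_nil, List.length_cons] at h; omega)
      | (simp only [pvRunB, List.take_succ_cons, List.take_zero, List.tail_cons])

-- tail of a take: used to step the B-side segment
lemma pv_tail_take (l : List Int) (n : Nat) : (l.take (n + 1)).tail = l.tail.take n := by
  cases l <;> simp

-- A's loop over pyRange a b reading leads[i] is pvRunA on the segment leads[a:b]
lemma pvLoopA_eq_runA (leads : List Int) (a b : Int) (cr cd : Int)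
    (ha : 0 ≤ a) (hb : b ≤ (leads.length : Int)) :
    pvLoopA leads (PySem.List.pyRange a b 1) cr cd
      = pvRunA ((leads.drop a.toNat).take (b - a).toNat) cr cd := by
  have key : ∀ (n : Nat) (a cr cd : Int), 0 ≤ a → (b - a).toNat = n →
      pvLoopA leads (PySem.List.pyRange a b 1) cr cd
        = pvRunA ((leads.drop a.toNat).take (b - a).toNat) cr cd := by
    intro n
    induction n with
    | zero =>
      intro a cr cd ha hn
      have hba : b ≤ a := by omega
      rw [PySem.List.pyRange_one_eq_nil hba, hn]
      simp [pvLoopA, pvRunA]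
    | succ n ih =>
      intro a cr cd ha hn
      have hab : a < b := by omega
      have halen : a.toNat < leads.length := by omega
      have hget : PySem.List.pyGet? leads a = some leads[a.toNat] :=
        PySem.List.pyGet?_eq_some_getElem (h0 := ha) (h1 := by omega)
      rw [PySem.List.pyRange_one_cons hab, List.drop_eq_getElem_cons halen, hn,
          List.take_succ_cons]
      simp only [pvLoopA, pvRunA, hget]
      have hstep : ∀ cr cd : Int, pvLoopA leads (PySem.List.pyRange (a + 1) b 1) cr cd
          = pvRunA ((leads.drop (a.toNat + 1)).take n) cr cd := by
        intro cr cd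
        have h1 := ih (a + 1) cr cd (by omega) (by omega)
        have ha1 : (a + 1).toNat = a.toNat + 1 := by omega
        have hn1 : (b - (a + 1)).toNat = n := by omega
        rwa [ha1, hn1] at h1
      split_ifs <;> simp [hstep]
  exact key _ a cr cd ha rfl

-- B's loop over pyRange j 26 slicing leads[j:j+5] is pvRunB on the segment leads[j:30]
lemma pvLoopB_eq_runB (leads : List Int) (j : Int)
    (hj : 0 ≤ j) (hj2 : j ≤ 26) (hlen : 30 ≤ (leads.length : Int)) :
    pvLoopB leads (PySem.List.pyRange j 26 1)
      = pvRunB ((leads.drop j.toNat).take (30 - j.toNat)) := by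
  have key : ∀ (n : Nat) (j : Int), 0 ≤ j → j ≤ 26 → (26 - j).toNat = n →
      pvLoopB leads (PySem.List.pyRange j 26 1)
        = pvRunB ((leads.drop j.toNat).take (30 - j.toNat)) := by
    intro n
    induction n with
    | zero =>
      intro j hj hj2 hn
      have hj26 : j = 26 := by omega
      subst hj26
      rw [PySem.List.pyRange_one_eq_nil (by norm_num)]
      have : ((leads.drop (26 : Int).toNat).take (30 - (26 : Int).toNat)).length < 5 := by
        simp only [List.length_take, List.length_drop]
        omega
      rw [pvRunB_short _ this]
      rfl
    | succ n ih =>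
      intro j hj hj2 hn
      have hjlt : j < 26 := by omega
      have hlen' : leads.length ≥ 30 := by omega
      have hwin : PySem.List.slice leads (some j) (some (j + 5))
          = (leads.drop j.toNat).take 5 := by
        rw [PySem.List.slice_toNat leads hj (by omega)]
        congr 1
        omega
      have hseg : 5 ≤ ((leads.drop j.toNat).take (30 - j.toNat)).length := by
        simp only [List.length_take, List.length_drop]
        omega
      rw [PySem.List.pyRange_one_cons hjlt]
      rw [pvRunB_cons5 _ hseg]
      have htk : ((leads.drop j.toNat).take (30 - j.toNat)).take 5
          = (leads.drop j.toNat).take 5 := by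
        rw [List.take_take]
        congr 1
        omega
      obtain ⟨m, hm⟩ : ∃ m, 30 - j.toNat = m + 1 := ⟨30 - j.toNat - 1, by omega⟩
      have htl : ((leads.drop j.toNat).take (30 - j.toNat)).tail
          = (leads.drop (j + 1).toNat).take (30 - (j + 1).toNat) := by
        rw [hm, pv_tail_take, List.tail_drop, show (j + 1).toNat = j.toNat + 1 from by omega,
            show 30 - (j.toNat + 1) = m from by omega]
      have hrec := ih (j + 1) (by omega) (by omega) (by omega)
      simp only [pvLoopB, hwin, htk, htl, hrec]
  exact key _ j hj hj2 rfl

-- pvRunA never fires with fewer than five minutes left for either counter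
lemma pvRunA_short : ∀ (vs : List Int) (cr cd : Int), 0 ≤ cr → 0 ≤ cd →
    (vs.length : Int) + cr < 5 → (vs.length : Int) + cd < 5 → pvRunA vs cr cd = (false, none) := by
  intro vs
  induction vs with
  | nil => intro cr cd _ _ _ _; rfl
  | cons v t ih =>
    intro cr cd hcr hcd h1 h2
    simp only [List.length_cons] at h1 h2
    simp only [pvRunA]
    split_ifs with hv1 hv2 hv3 hv4
    · exfalso; omega
    · exact ih (cr + 1) 0 (by omega) le_rfl (by push_cast at *; omega) (by push_cast at *; omega)
    · exfalso; omega
    · exact ih 0 (cd + 1) le_rfl (by omega) (by push_cast at *; omega) (by push_cast at *; omega)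
    · exact ih 0 0 le_rfl le_rfl (by push_cast at *; omega) (by push_cast at *; omega)

-- a non-hi head makes the radiant counter irrelevant
lemma pvRunA_reset_cr (v : Int) (t : List Int) (cr : Int) (hv : ¬ v ≥ 5000) :
    pvRunA (v :: t) cr 0 = pvRunA (v :: t) 0 0 := by
  simp only [pvRunA, if_neg hv]

-- a non-lo head makes the dire counter irrelevant
lemma pvRunA_reset_cd (v : Int) (t : List Int) (cd : Int) (hv : ¬ v ≤ -5000) :
    pvRunA (v :: t) 0 cd = pvRunA (v :: t) 0 0 := by
  by_cases h1 : v ≥ 5000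
  · simp only [pvRunA, if_pos h1]
  · simp only [pvRunA, if_neg h1, if_neg hv]

-- running through k straight hi values adds k to the radiant counter
lemma pvRunA_run_hi : ∀ (k : Nat) (vs : List Int) (cr : Int), 0 ≤ cr → cr + k < 5 →
    (∀ m, m < k → vs.getD m 0 ≥ 5000) →
    pvRunA vs cr 0 = pvRunA (vs.drop k) (cr + k) 0 := by
  intro k
  induction k with
  | zero => intro vs cr _ _ _; simp
  | succ k ih =>
    intro vs cr hcr hk hall
    cases vs with
    | nil =>
      exfalso
      have := hall 0 (by omega)
      simp [List.getD] at this
    | cons v t =>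
      have hv : v ≥ 5000 := by simpa using hall 0 (by omega)
      simp only [pvRunA, if_pos hv, if_neg (show ¬ cr + 1 ≥ 5 by push_cast at hk; omega)]
      rw [ih t (cr + 1) (by omega) (by push_cast at hk ⊢; omega)
            (fun m hm => by simpa using hall (m + 1) (by omega))]
      rw [List.drop_succ_cons]
      congr 1
      push_cast
      ring

-- running through k straight lo values adds k to the dire counter
lemma pvRunA_run_lo : ∀ (k : Nat) (vs : List Int) (cd : Int), 0 ≤ cd → cd + k < 5 →
    (∀ m, m < k → vs.getD m 0 ≤ -5000) →
    pvRunA vs 0 cd = pvRunA (vs.drop k) 0 (cd + k) := by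
  intro k
  induction k with
  | zero => intro vs cd _ _ _; simp
  | succ k ih =>
    intro vs cd hcd hk hall
    cases vs with
    | nil =>
      exfalso
      have := hall 0 (by omega)
      simp [List.getD] at this
    | cons v t =>
      have hv : v ≤ -5000 := by simpa using hall 0 (by omega)
      have hnv : ¬ v ≥ 5000 := by omega
      simp only [pvRunA, if_neg hnv, if_pos hv,
        if_neg (show ¬ cd + 1 ≥ 5 by push_cast at hk; omega)]
      rw [ih t (cd + 1) (by omega) (by push_cast at hk ⊢; omega)
            (fun m hm => by simpa using hall (m + 1) (by omega))]
      rw [List.drop_succ_cons]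
      congr 1
      push_cast
      ring

-- the value at index i belongs to the window of five starting at s ≤ i
lemma pv_window_mem (l : List Int) (s i : Nat) (h1 : s ≤ i) (h2 : i < s + 5)
    (h3 : i < l.length) : l.getD i 0 ∈ (l.drop s).take 5 := by
  have hj : i - s < ((l.drop s).take 5).length := by
    simp only [List.length_take, List.length_drop]
    omega
  have hi' : s + (i - s) = i := by omega
  have : ((l.drop s).take 5)[i - s]'hj = l.getD i 0 := by
    rw [List.getElem_take, List.getElem_drop, List.getD_eq_getElem l 0 h3]
    exact getElem_congr rfl hi' (by omega)
  rw [← this]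
  exact List.getElem_mem _

-- pvRunB ignores a prefix none of whose windows is uniform
lemma pvRunB_skip : ∀ (p c : List Int),
    (∀ s, s < p.length → 5 ≤ ((p ++ c).drop s).length →
      ¬ ((((p ++ c).drop s).take 5).all (fun v => v ≥ 5000) = true) ∧
      ¬ ((((p ++ c).drop s).take 5).all (fun v => v ≤ -5000) = true)) →
    pvRunB (p ++ c) = pvRunB c := by
  intro p
  induction p with
  | nil => intro c _; rfl
  | cons a p ih =>
    intro c hfail
    by_cases hlen : 5 ≤ ((a :: p) ++ c).length
    · have h0 := hfail 0 (by simp) (by simpa using hlen)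
      simp only [List.drop_zero] at h0
      rw [pvRunB_cons5 _ hlen, if_neg (by simpa using h0.1), if_neg (by simpa using h0.2)]
      have : ((a :: p) ++ c).tail = p ++ c := by simp
      rw [this]
      exact ih c (fun s hs h5 => by
        have := hfail (s + 1) (by simp; omega) (by simpa using h5)
        simpa using this)
    · push Not at hlen
      rw [pvRunB_short _ hlen, pvRunB_short c (by simp at hlen ⊢; omega)]

-- the core equivalence of the two loop bodies
lemma pvRunA_eq_runB (vs : List Int) : pvRunA vs 0 0 = pvRunB vs := by
  suffices H : ∀ (n : Nat) (vs : List Int), vs.length ≤ n → pvRunA vs 0 0 = pvRunB vs from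
    H vs.length vs le_rfl
  intro n
  induction n with
  | zero =>
    intro vs h
    have hnil : vs = [] := List.eq_nil_of_length_eq_zero (by omega)
    subst hnil; rfl
  | succ n ih =>
    intro vs hlen
    by_cases h5 : vs.length < 5
    · rw [pvRunA_short vs 0 0 le_rfl le_rfl (by omega) (by omega),
        pvRunB_short vs h5]
    · push Not at h5
      cases vs with
      | nil => simp at h5
      | cons v t =>
        have hlen5 : 5 ≤ (v :: t).length := h5
        by_cases hv : v ≥ 5000
        · by_cases hall : ∀ m, m < 5 → (v :: t).getD m 0 ≥ 5000
          · -- all five hi: both return radiant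
            have h4len : 4 < (v :: t).length := by omega
            obtain ⟨w, r, hw⟩ : ∃ w r, (v :: t).drop 4 = w :: r := by
              cases hd : (v :: t).drop 4 with
              | nil =>
                exfalso
                have := congrArg List.length hd
                simp only [List.length_drop, List.length_nil] at this
                omega
              | cons w r => exact ⟨w, r, rfl⟩
            have hwk : (v :: t).getD 4 0 = w := by
              have h0 : ((v :: t).drop 4).getD 0 0 = (v :: t).getD 4 0 := by
                rw [List.getD_eq_getElem _ _ (by simp only [List.length_drop]; omega),
                  List.getD_eq_getElem _ _ h4len, List.getElem_drop]
              rw [hw] at h0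
              simpa using h0.symm
            have hw5 : w ≥ 5000 := by rw [← hwk]; exact hall 4 (by omega)
            have hA : pvRunA (v :: t) 0 0 = (true, some "radiant") := by
              rw [pvRunA_run_hi 4 (v :: t) 0 le_rfl (by norm_num)
                (fun m hm => hall m (by omega)), hw]
              simp only [pvRunA, if_pos hw5]
              norm_num
            have hBall : ((v :: t).take 5).all (fun x => x ≥ 5000) = true := by
              rw [List.all_eq_true]
              intro x hx
              obtain ⟨i, hi, hxi⟩ := List.getElem_of_mem hx
              have hi5 : i < 5 := by simp [List.length_take] at hi; omega
              have hilen : i < (v :: t).length := by simp [List.length_take] at hi; omega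
              have hxd : x = (v :: t).getD i 0 := by
                rw [← hxi, List.getElem_take, List.getD_eq_getElem _ _ hilen]
              rw [hxd]
              simpa using hall i hi5
            have hB : pvRunB (v :: t) = (true, some "radiant") := by
              rw [pvRunB_cons5 _ hlen5, if_pos hBall]
            rw [hA, hB]
          · -- hi head but the run breaks before five: skip to the break
            push Not at hall
            obtain ⟨m0, hm0, hm0v⟩ := hall
            have hPex : ∃ m, ¬ ((v :: t).getD m 0 ≥ 5000) := ⟨m0, by omega⟩
            set k := Nat.find hPex with hkdef
            have hk_spec : ¬ ((v :: t).getD k 0 ≥ 5000) := Nat.find_spec hPex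
            have hk_le : k ≤ m0 := Nat.find_min' hPex (by omega)
            have hk5 : k < 5 := by omega
            have hk_min : ∀ i, i < k → (v :: t).getD i 0 ≥ 5000 := by
              intro i hi
              by_contra hcon
              exact absurd (Nat.find_min' hPex hcon) (by omega)
            have hk1 : 1 ≤ k := by
              rcases Nat.eq_zero_or_pos k with h0 | h
              · exfalso; apply hk_spec; rw [h0]; simpa using hv
              · exact h
            have hklen : k < (v :: t).length := by omega
            obtain ⟨w, r, hw⟩ : ∃ w r, (v :: t).drop k = w :: r := by
              cases hd : (v :: t).drop k with
              | nil =>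
                exfalso
                have := congrArg List.length hd
                simp only [List.length_drop, List.length_nil] at this
                omega
              | cons w r => exact ⟨w, r, rfl⟩
            have hwk : (v :: t).getD k 0 = w := by
              have h0 : ((v :: t).drop k).getD 0 0 = (v :: t).getD k 0 := by
                rw [List.getD_eq_getElem _ _ (by simp only [List.length_drop]; omega),
                  List.getD_eq_getElem _ _ hklen, List.getElem_drop]
                simp
              rw [hw] at h0
              simpa using h0.symm
            have hA : pvRunA (v :: t) 0 0 = pvRunA ((v :: t).drop k) 0 0 := by
              rw [pvRunA_run_hi k (v :: t) 0 le_rfl (by omega) hk_min, hw,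
                show (0 : Int) + (k : Int) = (k : Int) from by ring]
              exact pvRunA_reset_cr w r (k : Int) (by rw [← hwk]; exact hk_spec)
            have hIH : pvRunA ((v :: t).drop k) 0 0 = pvRunB ((v :: t).drop k) :=
              ih _ (by simp only [List.length_drop]; simp only [List.length_cons] at hlen ⊢; omega)
            have hskip : pvRunB (v :: t) = pvRunB ((v :: t).drop k) := by
              have hsplit : (v :: t) = (v :: t).take k ++ (v :: t).drop k :=
                (List.take_append_drop k _).symm
              nth_rewrite 1 [hsplit]
              apply pvRunB_skip
              intro s hs h5len
              rw [List.take_append_drop] at h5len ⊢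
              simp only [List.length_take] at hs
              have hsk : s < k := by omega
              constructor
              · intro hContr
                have hx := List.all_eq_true.mp hContr ((v :: t).getD k 0)
                  (pv_window_mem _ s k (by omega) (by omega) hklen)
                exact absurd (of_decide_eq_true hx) hk_spec
              · intro hContr
                have hx := List.all_eq_true.mp hContr ((v :: t).getD s 0)
                  (pv_window_mem _ s s le_rfl (by omega) (by omega))
                have hs5 := hk_min s hsk
                have := of_decide_eq_true hx
                omega
            rw [hA, hIH, hskip]
        · by_cases hlo : v ≤ -5000
          · by_cases hall : ∀ m, m < 5 → (v :: t).getD m 0 ≤ -5000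
            · -- all five lo: both return dire
              have h4len : 4 < (v :: t).length := by omega
              obtain ⟨w, r, hw⟩ : ∃ w r, (v :: t).drop 4 = w :: r := by
                cases hd : (v :: t).drop 4 with
                | nil =>
                  exfalso
                  have := congrArg List.length hd
                  simp only [List.length_drop, List.length_nil] at this
                  omega
                | cons w r => exact ⟨w, r, rfl⟩
              have hwk : (v :: t).getD 4 0 = w := by
                have h0 : ((v :: t).drop 4).getD 0 0 = (v :: t).getD 4 0 := by
                  rw [List.getD_eq_getElem _ _ (by simp only [List.length_drop]; omega),
                    List.getD_eq_getElem _ _ h4len, List.getElem_drop]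
                rw [hw] at h0
                simpa using h0.symm
              have hw5 : w ≤ -5000 := by rw [← hwk]; exact hall 4 (by omega)
              have hA : pvRunA (v :: t) 0 0 = (true, some "dire") := by
                rw [pvRunA_run_lo 4 (v :: t) 0 le_rfl (by norm_num)
                  (fun m hm => hall m (by omega)), hw]
                simp only [pvRunA, if_neg (show ¬ w ≥ 5000 by omega), if_pos hw5]
                norm_num
              have hBhi : ¬ (((v :: t).take 5).all (fun x => x ≥ 5000) = true) := by
                intro hContr
                have hx := List.all_eq_true.mp hContr ((v :: t).getD 0 0)
                  (pv_window_mem _ 0 0 le_rfl (by omega) (by simp))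
                have hval : (v :: t).getD 0 0 = v := rfl
                rw [hval] at hx
                have := of_decide_eq_true hx
                omega
              have hBall : ((v :: t).take 5).all (fun x => x ≤ -5000) = true := by
                rw [List.all_eq_true]
                intro x hx
                obtain ⟨i, hi, hxi⟩ := List.getElem_of_mem hx
                have hi5 : i < 5 := by simp [List.length_take] at hi; omega
                have hilen : i < (v :: t).length := by simp [List.length_take] at hi; omega
                have hxd : x = (v :: t).getD i 0 := by
                  rw [← hxi, List.getElem_take, List.getD_eq_getElem _ _ hilen]
                rw [hxd]
                simpa using hall i hi5
              have hB : pvRunB (v :: t) = (true, some "dire") := by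
                rw [pvRunB_cons5 _ hlen5, if_neg hBhi, if_pos hBall]
              rw [hA, hB]
            · -- lo head but the run breaks before five: skip to the break
              push Not at hall
              obtain ⟨m0, hm0, hm0v⟩ := hall
              have hPex : ∃ m, ¬ ((v :: t).getD m 0 ≤ -5000) := ⟨m0, by omega⟩
              set k := Nat.find hPex with hkdef
              have hk_spec : ¬ ((v :: t).getD k 0 ≤ -5000) := Nat.find_spec hPex
              have hk_le : k ≤ m0 := Nat.find_min' hPex (by omega)
              have hk5 : k < 5 := by omega
              have hk_min : ∀ i, i < k → (v :: t).getD i 0 ≤ -5000 := by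
                intro i hi
                by_contra hcon
                exact absurd (Nat.find_min' hPex hcon) (by omega)
              have hk1 : 1 ≤ k := by
                rcases Nat.eq_zero_or_pos k with h0 | h
                · exfalso; apply hk_spec; rw [h0]; simpa using hlo
                · exact h
              have hklen : k < (v :: t).length := by omega
              obtain ⟨w, r, hw⟩ : ∃ w r, (v :: t).drop k = w :: r := by
                cases hd : (v :: t).drop k with
                | nil =>
                  exfalso
                  have := congrArg List.length hd
                  simp only [List.length_drop, List.length_nil] at this
                  omega
                | cons w r => exact ⟨w, r, rfl⟩
              have hwk : (v :: t).getD k 0 = w := by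
                have h0 : ((v :: t).drop k).getD 0 0 = (v :: t).getD k 0 := by
                  rw [List.getD_eq_getElem _ _ (by simp only [List.length_drop]; omega),
                    List.getD_eq_getElem _ _ hklen, List.getElem_drop]
                  simp
                rw [hw] at h0
                simpa using h0.symm
              have hA : pvRunA (v :: t) 0 0 = pvRunA ((v :: t).drop k) 0 0 := by
                rw [pvRunA_run_lo k (v :: t) 0 le_rfl (by omega) hk_min, hw,
                  show (0 : Int) + (k : Int) = (k : Int) from by ring]
                exact pvRunA_reset_cd w r (k : Int) (by rw [← hwk]; exact hk_spec)
              have hIH : pvRunA ((v :: t).drop k) 0 0 = pvRunB ((v :: t).drop k) :=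
                ih _ (by simp only [List.length_drop]; simp only [List.length_cons] at hlen ⊢; omega)
              have hskip : pvRunB (v :: t) = pvRunB ((v :: t).drop k) := by
                have hsplit : (v :: t) = (v :: t).take k ++ (v :: t).drop k :=
                  (List.take_append_drop k _).symm
                nth_rewrite 1 [hsplit]
                apply pvRunB_skip
                intro s hs h5len
                rw [List.take_append_drop] at h5len ⊢
                simp only [List.length_take] at hs
                have hsk : s < k := by omega
                constructor
                · intro hContr
                  have hx := List.all_eq_true.mp hContr ((v :: t).getD s 0)
                    (pv_window_mem _ s s le_rfl (by omega) (by omega))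
                  have hs5 := hk_min s hsk
                  have := of_decide_eq_true hx
                  omega
                · intro hContr
                  have hx := List.all_eq_true.mp hContr ((v :: t).getD k 0)
                    (pv_window_mem _ s k (by omega) (by omega) hklen)
                  exact absurd (of_decide_eq_true hx) hk_spec
              rw [hA, hIH, hskip]
          · -- mid head: both drop it
            have hA : pvRunA (v :: t) 0 0 = pvRunA t 0 0 := by
              simp only [pvRunA, if_neg hv, if_neg hlo]
            have hskip : pvRunB (v :: t) = pvRunB t := by
              show pvRunB ([v] ++ t) = pvRunB t
              apply pvRunB_skip
              intro s hs h5len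
              have hs0 : s = 0 := by simpa using hs
              subst hs0
              constructor
              · intro hContr
                have hx := List.all_eq_true.mp hContr (([v] ++ t).getD 0 0)
                  (pv_window_mem _ 0 0 le_rfl (by omega) (by simp))
                have hval : ([v] ++ t).getD 0 0 = v := rfl
                rw [hval] at hx
                have := of_decide_eq_true hx
                omega
              · intro hContr
                have hx := List.all_eq_true.mp hContr (([v] ++ t).getD 0 0)
                  (pv_window_mem _ 0 0 le_rfl (by omega) (by simp))
                have hval : ([v] ++ t).getD 0 0 = v := rfl
                rw [hval] at hx
                have := of_decide_eq_true hx
                omega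
            rw [hA, ih t (by simp only [List.length_cons] at hlen; omega), hskip]

theorem is_early_match_stable5k_5min_spec' (match_ : List (String × List Int)) :
    is_early_match_stable5k_5min match_ = is_early_match_stable5k_5min_alt match_ := by
  unfold is_early_match_stable5k_5min is_early_match_stable5k_5min_alt
  set leads := pvGetLeads match_ with hL
  by_cases hd : (leads.length : Int) < 30 ∨ (leads.length : Int) > 50
  · rw [if_pos hd, if_pos (by omega)]
  · rw [if_neg hd, if_neg (by omega)]
    have h30 : (30 : Int) ≤ leads.length := by omega
    have hmin : min (30 : Int) (leads.length : Int) = 30 := by omega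
    rw [hmin, pvLoopA_eq_runA leads 15 30 0 0 (by norm_num) h30,
        pvLoopB_eq_runB leads 15 (by norm_num) (by norm_num) h30]
    norm_num
    exact pvRunA_eq_runB _

-- ===== VERDICT (by name: the statement is the Claim_ definition above) =====
theorem is_early_match_stable5k_5min_spec : Claim_equal_is_early_match_stable5k_5min := by
  intro match_ _
  exact is_early_match_stable5k_5min_spec' match_
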